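-- pv_equiv track=rewrite | github.com/IAjimi/AdventOfCode | 2019/AOC12.py | apply_gravity
-- ===== SOURCE A (Python) =====
-- def apply_gravity(pos, velocity):
-- 	for ix in range(len(pos)):
-- 		n = 0
-- 		val = pos[ix]
-- 		for v in pos:
-- 			if val < v:
-- 				n += 1
-- 			elif val > v:
-- 				n += -1
--
-- 		velocity[ix] += n
--
-- 	pos = pos + velocity
--
-- 	return pos, velocity
-- ===== SOURCE B (Python) =====
-- def apply_gravity(pos, velocity):
--     # Sort the positions once; each value's net gravity is
--     # (#strictly greater) - (#strictly smaller), read off the boundaries of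
--     # its run of equal values in the sorted list: O(n log n) instead of O(n^2).
--     s = sorted(pos)
--     n = len(s)
--     net = {}
--     i = 0
--     while i < n:
--         j = i + 1
--         while j < n and s[j] == s[i]:
--             j += 1
--         net[s[i]] = (n - j) - i
--         i = j
--     for k in range(len(pos)):
--         velocity[k] += net[pos[k]]
--     return pos + velocity, velocity
-- ===== Notes on version B (the rewrite author's own statement) =====
-- stated objective: faster
-- what changed: B sorts the positions once and computes each value's net gravity (#greater - #less) from its run boundaries in the sorted list via a value->net dict, instead of A's full inner scan per element.
import Mathlib
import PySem

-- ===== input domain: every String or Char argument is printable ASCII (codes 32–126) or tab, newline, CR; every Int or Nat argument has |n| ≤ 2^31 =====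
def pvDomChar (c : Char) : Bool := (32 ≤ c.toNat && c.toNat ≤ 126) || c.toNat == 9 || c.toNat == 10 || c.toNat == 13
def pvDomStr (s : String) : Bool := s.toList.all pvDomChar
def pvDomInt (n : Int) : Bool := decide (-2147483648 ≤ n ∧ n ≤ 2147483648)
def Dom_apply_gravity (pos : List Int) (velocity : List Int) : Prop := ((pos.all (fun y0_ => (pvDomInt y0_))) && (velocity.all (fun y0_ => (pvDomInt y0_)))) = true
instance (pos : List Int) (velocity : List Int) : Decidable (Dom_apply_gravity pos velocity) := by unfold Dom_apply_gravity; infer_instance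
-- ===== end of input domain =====

-- B sorts the positions once and reads each element's net gravity off its run boundaries in the
-- sorted list instead of A's per-element full scan (asymptotically faster). Both Pythons mutate
-- `velocity` in place the same way; the theorems are about the return value.


-- ===== PORT A =====
-- for ix in range(len(pos)): n = Σ ±1 over pos; velocity[ix] += n.  getD 0 is exact here:
-- ix < pos.length always, and ix < velocity.length under Pre_ (outside it Python raises).
def apply_gravity (pos : List Int) (velocity : List Int) : List Int × List Int :=
  let vel := (List.range pos.length).foldl (fun vel ix =>
    let val := pos.getD ix 0
    let n := pos.foldl (fun n v => if val < v then n + 1 else if val > v then n + -1 else n) (0 : Int)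
    vel.set ix (vel.getD ix 0 + n)) velocity
  (pos ++ vel, vel)

-- ===== PORT B =====
-- the `while i < n:` loop of Source B; the inner `while j < n and s[j] == s[i]: j += 1` scan is the
-- takeWhile/dropWhile split of the tail, j = i + 1 + (length of the equal run).
def bnetGo (n : Nat) : List Int → Nat → PySem.Dict Int Int → PySem.Dict Int Int
  | [], _, d => d
  | x :: rest, i, d =>
    let j := i + 1 + (rest.takeWhile (fun v => v == x)).length
    bnetGo n (rest.dropWhile (fun v => v == x)) j (d.insert x (((n : Int) - (j : Int)) - (i : Int)))
  termination_by s => s.length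
  decreasing_by
    simpa using Nat.lt_succ_of_le (List.length_dropWhile_le (fun v => v == x) rest)

-- for k in range(len(pos)): velocity[k] += net[pos[k]].  getD is exact: k < pos.length and,
-- under Pre_, k < velocity.length; net always has pos[k] as a key.
def apply_gravity_alt (pos : List Int) (velocity : List Int) : List Int × List Int :=
  let s := PySem.List.sorted pos (fun x => x) false
  let net := bnetGo s.length s 0 PySem.Dict.empty
  let vel := (List.range pos.length).foldl (fun vel k =>
    vel.set k (vel.getD k 0 + net.getD (pos.getD k 0) 0)) velocity
  (pos ++ vel, vel)

-- ===== PRECONDITION & SPEC =====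
-- A raises IndexError at `velocity[ix] += n` when velocity is shorter than pos; nothing else raises.
def Pre_apply_gravity (pos : List Int) (velocity : List Int) : Prop :=
  pos.length ≤ velocity.length
instance (pos : List Int) (velocity : List Int) : Decidable (Pre_apply_gravity pos velocity) := by
  unfold Pre_apply_gravity; infer_instance
def pvWitness_apply_gravity : List Int × List Int := ([3, -1, 3], [1, 2, 3, 4])

def Spec_apply_gravity (pos : List Int) (velocity : List Int) (out : List Int × List Int) : Prop := out = apply_gravity_alt pos velocity
instance (pos : List Int) (velocity : List Int) (out : List Int × List Int) : Decidable (Spec_apply_gravity pos velocity out) := by unfold Spec_apply_gravity; infer_instance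

-- ===== CLAIM (what is proved, stated in full; the proofs are below) =====
def Claim_equal_apply_gravity : Prop := ∀ (pos : List Int) (velocity : List Int), Dom_apply_gravity pos velocity → Pre_apply_gravity pos velocity → Spec_apply_gravity pos velocity (apply_gravity pos velocity)

-- ===== LEMMAS AND PROOFS =====

-- A's inner loop is the difference of two counts.
theorem innerA_eq_counts (val : Int) (l : List Int) (a : Int) :
    l.foldl (fun n v => if val < v then n + 1 else if val > v then n + -1 else n) a
      = a + (l.countP (fun v => decide (val < v)) : Int) - (l.countP (fun v => decide (v < val)) : Int) := by
  induction l generalizing a with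
  | nil => simp
  | cons x t ih =>
    simp only [List.foldl_cons, List.countP_cons, ih]
    by_cases h1 : val < x
    · simp [h1, not_lt.mpr (le_of_lt h1)]; ring
    · by_cases h2 : x < val
      · simp [h1, h2]; ring
      · simp [h1, h2]

-- the count of strictly greater elements is the complement of the count of ≤ ones
theorem countP_gt_eq (l : List Int) (val : Int) :
    (l.countP (fun v => decide (val < v)) : Int) = l.length - l.countP (fun v => decide (v ≤ val)) := by
  have h1 := List.length_eq_countP_add_countP (fun v => decide (v ≤ val)) (l := l)
  have h2 : l.countP (fun a => !decide (a ≤ val)) = l.countP (fun v => decide (val < v)) :=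
    List.countP_congr (fun v _ => by simp [not_le])
  simp only [decide_not, decide_eq_true_eq] at h1 h2 ⊢
  omega

theorem dropWhile_run_gt (x : Int) (rest : List Int) (hs : (x :: rest).Pairwise (· ≤ ·)) :
    ∀ v ∈ rest.dropWhile (fun v => v == x), x < v := by
  obtain ⟨hpw, hpr⟩ := List.pairwise_cons.mp hs
  cases hr : rest.dropWhile (fun v => v == x) with
  | nil => simp
  | cons y rs =>
    have hy : ¬ ((y == x) = true) := by
      have := List.head?_dropWhile_not (fun v => v == x) rest
      rw [hr] at this; simpa using this
    have hsub : List.Sublist (y :: rs) rest := hr ▸ List.dropWhile_sublist _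
    have hxy : x < y := lt_of_le_of_ne (hpw y (hsub.mem List.mem_cons_self)) (Ne.symm (by simpa using hy))
    have hpy : (y :: rs).Pairwise (· ≤ ·) := hpr.sublist hsub
    intro v hv
    rcases List.mem_cons.mp hv with h | h
    · exact h ▸ hxy
    · exact lt_of_lt_of_le hxy ((List.pairwise_cons.mp hpy).1 v h)

theorem bnet_lookup (n m : Nat) : ∀ (s : List Int), s.length ≤ m → ∀ (i : Nat) (d : PySem.Dict Int Int),
    s.Pairwise (· ≤ ·) → n = i + s.length → ∀ (val : Int),
    (bnetGo n s i d).getD val 0 =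
      if val ∈ s then
        ((n : Int) - ((i : Int) + (s.countP (fun v => decide (v ≤ val)) : Int)))
          - ((i : Int) + (s.countP (fun v => decide (v < val)) : Int))
      else d.getD val 0 := by
  induction m with
  | zero =>
    intro s hlen i d _ _ val
    have : s = [] := List.eq_nil_of_length_eq_zero (Nat.le_zero.mp hlen)
    subst this; simp [bnetGo]
  | succ m ih =>
    intro s hlen i d hs hn val
    match s with
    | [] => simp [bnetGo]
    | x :: rest =>
      rw [bnetGo]
      set t := rest.takeWhile (fun v => v == x) with ht
      set r := rest.dropWhile (fun v => v == x) with hr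
      have hsplit : t ++ r = rest := List.takeWhile_append_dropWhile
      have htx : ∀ v ∈ t, v = x := fun v hv => by
        have := List.mem_takeWhile_imp hv; simpa using this
      have hrx : ∀ v ∈ r, x < v := dropWhile_run_gt x rest hs
      have hrlen : r.length ≤ m := by
        have h1 : List.length t + List.length r = List.length rest := by
          rw [← List.length_append, hsplit]
        simp only [List.length_cons] at hlen; omega
      have hrs : r.Pairwise (· ≤ ·) :=
        ((List.pairwise_cons.mp hs).2).sublist (List.dropWhile_sublist _)
      have hnr : n = (i + 1 + t.length) + r.length := by
        have h1 : List.length t + List.length r = List.length rest := by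
          rw [← List.length_append, hsplit]
        simp only [List.length_cons] at hn; omega
      rw [ih r hrlen _ _ hrs hnr val]
      -- counts over s decompose over x :: t ++ r
      have hcnt : ∀ p : Int → Bool, (x :: rest).countP p
          = (if p x then 1 else 0) + t.countP p + r.countP p := by
        intro p
        rw [List.countP_cons, ← hsplit, List.countP_append]
        by_cases hpx : p x = true
        · simp [hpx]; omega
        · simp [hpx]
      by_cases hmem : val ∈ x :: rest
      · rcases List.mem_cons.mp hmem with hvx | hvrest
        · -- val = x : not in r; lookup falls to the inserted binding
          subst hvx
          have hnotr : val ∉ r := fun h => lt_irrefl val (hrx val h)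
          rw [if_neg hnotr, PySem.Dict.getD_insert_self, if_pos hmem]
          have hle : (val :: rest).countP (fun v => decide (v ≤ val)) = 1 + t.length := by
            rw [hcnt]
            have h1 : t.countP (fun v => decide (v ≤ val)) = t.length :=
              List.countP_eq_length.mpr (fun v hv => by simp [htx v hv])
            have h2 : r.countP (fun v => decide (v ≤ val)) = 0 :=
              List.countP_eq_zero.mpr (fun v hv => by simp [not_le.mpr (hrx v hv)])
            simp [h1, h2]
          have hlt : (val :: rest).countP (fun v => decide (v < val)) = 0 := by
            rw [hcnt]
            have h1 : t.countP (fun v => decide (v < val)) = 0 :=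
              List.countP_eq_zero.mpr (fun v hv => by simp [htx v hv])
            have h2 : r.countP (fun v => decide (v < val)) = 0 :=
              List.countP_eq_zero.mpr (fun v hv => by simp [not_lt.mpr (le_of_lt (hrx v hv))])
            simp [h1, h2]
          rw [hle, hlt]
          push_cast; ring
        · -- val ∈ rest
          by_cases hvr : val ∈ r
          · -- val strictly greater than x: counts shift by the whole run
            have hxval : x < val := hrx val hvr
            rw [if_pos hvr, if_pos hmem]
            have hle : (x :: rest).countP (fun v => decide (v ≤ val))
                = 1 + t.length + r.countP (fun v => decide (v ≤ val)) := by
              rw [hcnt]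
              have h1 : t.countP (fun v => decide (v ≤ val)) = t.length :=
                List.countP_eq_length.mpr (fun v hv => by simp [htx v hv]; omega)
              simp [le_of_lt hxval, h1]
            have hlt : (x :: rest).countP (fun v => decide (v < val))
                = 1 + t.length + r.countP (fun v => decide (v < val)) := by
              rw [hcnt]
              have h1 : t.countP (fun v => decide (v < val)) = t.length :=
                List.countP_eq_length.mpr (fun v hv => by simp [htx v hv]; omega)
              simp [hxval, h1]
            rw [hle, hlt]
            push_cast; ring
          · -- val ∈ t : then val = x again
            have : val = x := by
              rcases (List.mem_append.mp (hsplit ▸ hvrest)) with h | h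
              · exact htx val h
              · exact absurd h hvr
            subst this
            have hnotr : val ∉ r := hvr
            rw [if_neg hnotr, PySem.Dict.getD_insert_self, if_pos hmem]
            have hle : (val :: rest).countP (fun v => decide (v ≤ val)) = 1 + t.length := by
              rw [hcnt]
              have h1 : t.countP (fun v => decide (v ≤ val)) = t.length :=
                List.countP_eq_length.mpr (fun v hv => by simp [htx v hv])
              have h2 : r.countP (fun v => decide (v ≤ val)) = 0 :=
                List.countP_eq_zero.mpr (fun v hv => by simp [not_le.mpr (hrx v hv)])
              simp [h1, h2]
            have hlt : (val :: rest).countP (fun v => decide (v < val)) = 0 := by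
              rw [hcnt]
              have h1 : t.countP (fun v => decide (v < val)) = 0 :=
                List.countP_eq_zero.mpr (fun v hv => by simp [htx v hv])
              have h2 : r.countP (fun v => decide (v < val)) = 0 :=
                List.countP_eq_zero.mpr (fun v hv => by simp [not_lt.mpr (le_of_lt (hrx v hv))])
              simp [h1, h2]
            rw [hle, hlt]
            push_cast; ring
      · -- val outside s: falls through insert too
        have hvx : val ≠ x := fun h => hmem (h ▸ List.mem_cons_self)
        have hvr : val ∉ r := fun h => hmem (by
          rw [← hsplit] at *
          exact List.mem_cons.mpr (Or.inr (List.mem_append_right _ h)))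
        rw [if_neg hvr, if_neg hmem, PySem.Dict.getD_insert_of_ne _ _ _ hvx]

-- both loops have this shape: set index ix to its old value plus a per-index increment F ix
theorem loopA_eq_map (F : Nat → Int) (velocity : List Int) (k : Nat) (hk : k ≤ velocity.length) :
    (List.range k).foldl (fun vel ix => vel.set ix (vel.getD ix 0 + F ix)) velocity
      = (List.range k).map (fun i => velocity.getD i 0 + F i) ++ velocity.drop k := by
  induction k with
  | zero => simp
  | succ m ih =>
    have hm : m < velocity.length := hk
    rw [List.range_succ, List.foldl_append, List.map_append, ih (le_of_lt hm)]
    simp only [List.foldl_cons, List.foldl_nil, List.map_cons, List.map_nil]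
    have hget : (((List.range m).map (fun i => velocity.getD i 0 + F i)) ++ velocity.drop m).getD m 0
        = velocity.getD m 0 := by
      simp [List.getD, List.getElem?_append_right, List.getElem?_eq_getElem hm,
        List.getElem?_drop]
    rw [hget, List.drop_eq_getElem_cons hm, List.set_append]
    simp [List.getD, List.getElem?_eq_getElem hm]
    rw [List.drop_eq_getElem_cons hm]
    rfl

-- ===== VERDICT (by name: the statement is the Claim_ definition above) =====
theorem apply_gravity_spec : Claim_equal_apply_gravity := by
  intro pos velocity _ hpre
  unfold Spec_apply_gravity apply_gravity apply_gravity_alt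
  simp only []
  have hperm : (PySem.List.sorted pos (fun x => x) false).Perm pos :=
    PySem.List.sorted_perm pos (fun x => x) false
  have hlenS : (PySem.List.sorted pos (fun x => x) false).length = pos.length := hperm.length_eq
  have hpw : (PySem.List.sorted pos (fun x => x) false).Pairwise (· ≤ ·) := by
    simpa using PySem.List.sorted_pairwise (xs := pos) (key := fun x => x)
  rw [loopA_eq_map _ velocity pos.length hpre, loopA_eq_map _ velocity pos.length hpre]
  have helt : ∀ i ∈ List.range pos.length,
      velocity.getD i 0 + pos.foldl
        (fun n v => if pos.getD i 0 < v then n + 1 else if pos.getD i 0 > v then n + -1 else n) 0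
      = velocity.getD i 0 +
        (bnetGo (PySem.List.sorted pos (fun x => x) false).length
          (PySem.List.sorted pos (fun x => x) false) 0 PySem.Dict.empty).getD (pos.getD i 0) 0 := by
    intro i hi
    have hi' : i < pos.length := List.mem_range.mp hi
    congr 1
    rw [innerA_eq_counts, bnet_lookup (PySem.List.sorted pos (fun x => x) false).length
      (PySem.List.sorted pos (fun x => x) false).length _ (le_refl _) 0 _ hpw (by simp)]
    have hmem : pos.getD i 0 ∈ pos := by
      rw [List.getD_eq_getElem _ _ hi']; exact List.getElem_mem hi'
    rw [if_pos (hperm.mem_iff.mpr hmem)]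
    rw [hperm.countP_eq, hperm.countP_eq, countP_gt_eq, hlenS]
    push_cast
    ring
  rw [List.map_congr_left helt]
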